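-- pv_equiv track=rewrite | github.com/yaeba/binary-search-solutions | solutions/Shortest-Sublist-With-Max-Frequency.py | solve
-- ===== SOURCE A (Python) =====
-- def solve(nums):
--     d = {}
--
--     for (idx, num) in enumerate(nums):
--         if num not in d:
--             d[num] = (-1, 1, idx)  # (-count, len, start)
--         else:
--             (count, _, start) = d[num]
--             d[num] = (count - 1, idx - start + 1, start)
--
--     return min(d.values())[1]
-- ===== SOURCE B (Python) =====
-- def solve(nums):
--     f = max(nums.count(v) for v in nums)
--     rev = nums[::-1]
--     return min(len(nums) - nums.index(v) - rev.index(v)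
--                for v in dict.fromkeys(nums) if nums.count(v) == f)
-- ===== Notes on version B (the rewrite author's own statement) =====
-- stated objective: simpler
-- what changed: A maintains a dict of (-count, span, start) triples in one pass and extracts the answer via Python's lexicographic tuple min; B keeps no state at all: it takes the max of nums.count(v) and, among the distinct values attaining it, minimizes len(nums)-nums.index(v)-nums[::-1].index(v).
import Mathlib
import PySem

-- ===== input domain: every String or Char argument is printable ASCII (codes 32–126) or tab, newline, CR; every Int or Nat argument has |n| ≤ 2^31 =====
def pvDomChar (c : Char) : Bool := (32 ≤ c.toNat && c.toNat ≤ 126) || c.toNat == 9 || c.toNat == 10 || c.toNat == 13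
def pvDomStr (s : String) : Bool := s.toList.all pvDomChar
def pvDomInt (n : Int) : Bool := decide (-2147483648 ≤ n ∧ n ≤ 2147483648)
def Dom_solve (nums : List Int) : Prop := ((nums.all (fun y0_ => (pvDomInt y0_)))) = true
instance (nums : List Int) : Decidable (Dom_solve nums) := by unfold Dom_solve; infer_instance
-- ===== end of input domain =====

-- B keeps no running state at all: instead of A's dict of (-count, span, start) triples and
-- Python's lexicographic tuple-min, it takes the max of nums.count(v) and, among distinct
-- values attaining it, minimizes len(nums) - nums.index(v) - nums[::-1].index(v) (objective: simpler).

-- ===== PORT A =====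
-- Python's min(iterable) over tuples: lexicographic comparison, first minimum kept.
-- Ported exactly here (step for step: replace the running min only when strictly smaller).
def pyMinStep3 (m t : Int × Int × Int) : Int × Int × Int :=
  if t.1 < m.1 ∨ (t.1 = m.1 ∧ (t.2.1 < m.2.1 ∨ (t.2.1 = m.2.1 ∧ t.2.2 < m.2.2))) then t else m

def pyMin3 : List (Int × Int × Int) → Option (Int × Int × Int)
  | [] => none
  | x :: xs => some (xs.foldl pyMinStep3 x)

def solveStep (d : PySem.Dict Int (Int × Int × Int)) (p : Int × Int) :
    PySem.Dict Int (Int × Int × Int) :=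
  if d.contains p.2 = false then
    d.insert p.2 (-1, 1, p.1)
  else
    -- (count, _, start) = d[num]; contains holds here, so get? is some
    let t := (d.get? p.2).getD (0, 0, 0)
    d.insert p.2 (t.1 - 1, p.1 - t.2.2 + 1, t.2.2)

def solve (nums : List Int) : Int :=
  match pyMin3 ((PySem.List.enumerate nums 0).foldl solveStep PySem.Dict.empty).values with
  | some m => m.2.1
  | none => 0   -- Python raises ValueError (min of empty sequence); excluded by Pre_solve

-- ===== PORT B =====
def solve_alt (nums : List Int) : Int :=
  match PySem.List.max? (nums.map (fun v => (nums.count v : Int))) (fun x => x) with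
  | none => 0   -- Python raises ValueError (max of empty sequence); excluded by Pre_solve
  | some f =>
    let rev := (PySem.List.slice? nums none none (-1)).getD []   -- rev = nums[::-1]
    (PySem.List.min?
       (((PySem.List.dedup nums).filter (fun v => ((nums.count v : Int) == f))).map
          (fun v => (nums.length : Int) - ((PySem.List.index? nums v).getD 0 : Int)
                    - ((PySem.List.index? rev v).getD 0 : Int)))
       (fun x => x)).getD 0   -- generator nonempty whenever nums ≠ []

-- ===== PRECONDITION & SPEC =====
-- On the empty list both A and B raise ValueError (min/max of an empty sequence).
def Pre_solve (nums : List Int) : Prop := nums ≠ []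
instance (nums : List Int) : Decidable (Pre_solve nums) := by unfold Pre_solve; infer_instance
def pvWitness_solve : List Int := ([1, 2, 1])

def Spec_solve (nums : List Int) (out : Int) : Prop := out = solve_alt nums
instance (nums : List Int) (out : Int) : Decidable (Spec_solve nums out) := by unfold Spec_solve; infer_instance

-- ===== CLAIM (what is proved, stated in full; the proofs are below) =====
def Claim_equal_solve : Prop := ∀ (nums : List Int), Dom_solve nums → Pre_solve nums → Spec_solve nums (solve nums)

-- ===== LEMMAS AND PROOFS =====

-- first index of v in xs, as the Int B computes
def fIdx (xs : List Int) (v : Int) : Int := ((PySem.List.index? xs v).getD 0 : Int)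

-- the triple A's dict holds for a seen value v, expressed through B's quantities
def aTriple (xs : List Int) (v : Int) : Int × Int × Int :=
  (-(xs.count v : Int), (xs.length : Int) - fIdx xs v - fIdx xs.reverse v, fIdx xs v)

def AInv (xs : List Int) (d : PySem.Dict Int (Int × Int × Int)) : Prop :=
  d.keys = PySem.List.dedup xs ∧ ∀ v ∈ d.keys, d.getD v (0, 0, 0) = aTriple xs v

theorem dedup_append_single (xs : List Int) (x : Int) :
    PySem.List.dedup (xs ++ [x]) =
      if x ∈ xs then PySem.List.dedup xs else PySem.List.dedup xs ++ [x] := by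
  simp only [PySem.List.dedup_eq_ofList, PySem.Set.ofList_eq_foldl, List.foldl_append,
    List.foldl_cons, List.foldl_nil]
  rw [← PySem.Set.ofList_eq_foldl]
  rw [PySem.Set.add, PySem.Set.contains_eq_decide]
  by_cases hx : x ∈ xs <;> simp [PySem.Set.mem_ofList, hx]

theorem fIdx_append_of_mem (xs : List Int) (t : List Int) (v : Int) (h : v ∈ xs) :
    fIdx (xs ++ t) v = fIdx xs v := by
  unfold fIdx
  rw [PySem.List.index?_append_of_mem t h]

theorem fIdx_cons_self (xs : List Int) (v : Int) : fIdx (v :: xs) v = 0 := by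
  unfold fIdx
  rw [PySem.List.index?_cons_self]
  rfl

theorem fIdx_cons_of_ne (xs : List Int) (x v : Int) (hne : x ≠ v) (hmem : v ∈ xs) :
    fIdx (x :: xs) v = fIdx xs v + 1 := by
  unfold fIdx
  rw [PySem.List.index?_cons_of_ne xs hne]
  obtain ⟨k, hk⟩ := Option.isSome_iff_exists.1 ((PySem.List.index?_isSome_iff xs v).2 hmem)
  rw [hk]
  simp

theorem fold_inv (xs : List Int) :
    AInv xs ((PySem.List.enumerate xs 0).foldl solveStep PySem.Dict.empty) := by
  induction xs using List.reverseRecOn with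
  | nil =>
    constructor
    · rfl
    · intro v hv; simp [PySem.Dict.keys, PySem.Dict.empty] at hv
  | append_singleton xs x ih =>
    obtain ⟨hK, hV⟩ := ih
    rw [PySem.List.enumerate_append, PySem.List.enumerate_cons, PySem.List.enumerate_nil,
      List.foldl_append, List.foldl_cons, List.foldl_nil]
    set d := (PySem.List.enumerate xs 0).foldl solveStep PySem.Dict.empty with hd
    have hcont : d.contains x = decide (x ∈ xs) := by
      rw [PySem.Dict.contains_eq_decide_mem_keys, hK]
      simp
    by_cases hx : x ∈ xs
    · -- seen before: A overwrites d[x]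
      have hxK : x ∈ d.keys := by rw [hK, PySem.List.mem_dedup]; exact hx
      have ht : (d.get? x).getD (0, 0, 0) = aTriple xs x := by
        rw [← PySem.Dict.getD_eq_get?_getD]; exact hV x hxK
      have hstep : solveStep d (0 + (xs.length : Int), x) =
          d.insert x ((aTriple xs x).1 - 1,
            (0 + (xs.length : Int)) - (aTriple xs x).2.2 + 1, (aTriple xs x).2.2) := by
        simp [solveStep, hcont, hx, ht]
      rw [hstep]
      constructor
      · rw [PySem.Dict.keys_insert_of_contains, hK, dedup_append_single, if_pos hx]
        rw [hcont]; simp [hx]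
      · intro v hv
        have hvK : v ∈ d.keys := by
          rcases (PySem.Dict.mem_keys_insert _ _ _ _).1 hv with rfl | h
          · exact hxK
          · exact h
        rw [PySem.Dict.getD_insert]
        by_cases hvx : v = x
        · subst hvx
          rw [if_pos rfl]
          have hrev : (xs ++ [v]).reverse = v :: xs.reverse := by simp
          have hi1 := fIdx_append_of_mem xs [v] v hx
          have hi2 := fIdx_cons_self xs.reverse v
          have hcnt : (xs ++ [v]).count v = xs.count v + 1 := by
            simp [List.count_append]
          simp only [aTriple, Prod.mk.injEq, hrev, hi1, hi2, hcnt,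
            List.length_append, List.length_cons, List.length_nil]
          push_cast
          refine ⟨?_, ?_, ?_⟩ <;> first | trivial | omega
        · rw [if_neg hvx]
          have hvmem : v ∈ xs := by rw [← PySem.List.mem_dedup, ← hK]; exact hvK
          rw [hV v hvK]
          have hrev : (xs ++ [x]).reverse = x :: xs.reverse := by simp
          have hi1 := fIdx_append_of_mem xs [x] v hvmem
          have hi2 := fIdx_cons_of_ne xs.reverse x v (fun h => hvx h.symm) (by simpa using hvmem)
          have hcnt : (xs ++ [x]).count v = xs.count v := by
            simp [List.count_append, Ne.symm hvx]
          simp only [aTriple, Prod.mk.injEq, hrev, hi1, hi2, hcnt,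
            List.length_append, List.length_cons, List.length_nil]
          push_cast
          refine ⟨?_, ?_, ?_⟩ <;> first | trivial | omega
    · -- fresh value
      have hstep : solveStep d (0 + (xs.length : Int), x) =
          d.insert x (-1, 1, 0 + (xs.length : Int)) := by
        simp [solveStep, hcont, hx]
      rw [hstep]
      constructor
      · rw [PySem.Dict.keys_insert_of_not_contains, hK, dedup_append_single, if_neg hx]
        rw [hcont]; simp [hx]
      · intro v hv
        rw [PySem.Dict.getD_insert]
        by_cases hvx : v = x
        · subst hvx
          rw [if_pos rfl]
          have hrev : (xs ++ [v]).reverse = v :: xs.reverse := by simp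
          have hcnt : (xs ++ [v]).count v = 1 := by
            rw [List.count_append, List.count_eq_zero.2 hx]; simp
          simp only [aTriple, fIdx, hrev, PySem.List.index?_cons_self,
            PySem.List.index?_append_singleton_self xs v hx, hcnt, Prod.mk.injEq,
            Option.getD_some, List.length_append, List.length_cons, List.length_nil]
          push_cast
          refine ⟨?_, ?_, ?_⟩ <;> first | trivial | omega
        · rw [if_neg hvx]
          have hvK : v ∈ d.keys := by
            rcases (PySem.Dict.mem_keys_insert _ _ _ _).1 hv with h | h
            · exact absurd h hvx
            · exact h
          have hvmem : v ∈ xs := by rw [← PySem.List.mem_dedup, ← hK]; exact hvK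
          rw [hV v hvK]
          have hrev : (xs ++ [x]).reverse = x :: xs.reverse := by simp
          have hi1 := fIdx_append_of_mem xs [x] v hvmem
          have hi2 := fIdx_cons_of_ne xs.reverse x v (fun h => hvx h.symm) (by simpa using hvmem)
          have hcnt : (xs ++ [x]).count v = xs.count v := by
            simp [List.count_append, Ne.symm hvx]
          simp only [aTriple, Prod.mk.injEq, hrev, hi1, hi2, hcnt,
            List.length_append, List.length_cons, List.length_nil]
          push_cast
          refine ⟨?_, ?_, ?_⟩ <;> first | trivial | omega

theorem pyMinFold_spec (xs : List (Int × Int × Int)) :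
    ∀ m : Int × Int × Int, (xs.foldl pyMinStep3 m ∈ m :: xs) ∧
      ∀ t ∈ m :: xs, (xs.foldl pyMinStep3 m).1 < t.1 ∨
        ((xs.foldl pyMinStep3 m).1 = t.1 ∧ (xs.foldl pyMinStep3 m).2.1 ≤ t.2.1) := by
  induction xs with
  | nil =>
    intro m
    refine ⟨List.mem_singleton.2 rfl, ?_⟩
    intro t ht
    rw [List.mem_singleton.1 ht]
    simp
  | cons x xs ih =>
    intro m
    rw [List.foldl_cons]
    by_cases hcond : (x.1 < m.1 ∨ (x.1 = m.1 ∧ (x.2.1 < m.2.1 ∨ (x.2.1 = m.2.1 ∧ x.2.2 < m.2.2))))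
    · have hstep : pyMinStep3 m x = x := by rw [pyMinStep3, if_pos hcond]
      rw [hstep]
      obtain ⟨hmem, hbd⟩ := ih x
      have hself := hbd x List.mem_cons_self
      refine ⟨List.mem_cons_of_mem _ hmem, ?_⟩
      intro t ht
      rcases List.mem_cons.1 ht with rfl | ht'
      · omega
      · exact hbd t ht'
    · have hstep : pyMinStep3 m x = m := by rw [pyMinStep3, if_neg hcond]
      rw [hstep]
      obtain ⟨hmem, hbd⟩ := ih m
      have hself := hbd m List.mem_cons_self
      refine ⟨?_, ?_⟩
      · rcases List.mem_cons.1 hmem with h | h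
        · rw [h]; exact List.mem_cons_self
        · exact List.mem_cons_of_mem _ (List.mem_cons_of_mem _ h)
      · intro t ht
        rcases List.mem_cons.1 ht with rfl | ht'
        · exact hself
        · rcases List.mem_cons.1 ht' with rfl | ht''
          · omega
          · exact hbd t (List.mem_cons_of_mem _ ht'')

-- ===== VERDICT (by name: the statement is the Claim_ definition above) =====
theorem solve_spec : Claim_equal_solve := by
  unfold Claim_equal_solve Spec_solve Pre_solve
  intro nums _ hne
  set d := (PySem.List.enumerate nums 0).foldl solveStep PySem.Dict.empty with hd
  obtain ⟨hK, hV⟩ := fold_inv nums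
  rw [← hd] at hK hV
  have hnd : d.keys.Nodup := by rw [hK]; exact PySem.List.nodup_dedup nums
  have hKne : d.keys ≠ [] := by
    rw [hK]
    intro h
    obtain ⟨n, t, rfl⟩ := List.exists_cons_of_ne_nil hne
    have : n ∈ PySem.List.dedup (n :: t) := (PySem.List.mem_dedup _ _).2 List.mem_cons_self
    rw [h] at this
    simp at this
  have hvalsA : d.values = d.keys.map (fun v => aTriple nums v) := by
    rw [PySem.Dict.values_eq_map_keys d hnd (0, 0, 0)]
    exact List.map_congr_left hV
  have hvne : d.values ≠ [] := by
    rw [hvalsA]; simpa [List.map_eq_nil_iff] using hKne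
  obtain ⟨x, xs, hx⟩ := List.exists_cons_of_ne_nil hvne
  obtain ⟨hrmem, hrbd⟩ := pyMinFold_spec xs x
  rw [← hx] at hrmem hrbd
  have hA : solve nums = (xs.foldl pyMinStep3 x).2.1 := by
    unfold solve
    rw [← hd, hx]
    rfl
  -- A's minimum comes from some key v0
  obtain ⟨v0, hv0K, hv0⟩ := List.mem_map.1 (hvalsA ▸ hrmem)
  have hv0mem : v0 ∈ nums := (PySem.List.mem_dedup _ _).1 (hK ▸ hv0K)
  -- B's max of counts
  have hCne : nums.map (fun v => (nums.count v : Int)) ≠ [] := by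
    simpa [List.map_eq_nil_iff] using hne
  cases hmax : PySem.List.max? (nums.map (fun v => (nums.count v : Int))) (fun y => y) with
  | none => exact absurd ((PySem.List.max?_eq_none_iff _ _).1 hmax) hCne
  | some f =>
    have hfmem := PySem.List.max?_mem hmax
    have hfmax := PySem.List.max?_isMax hmax
    obtain ⟨w0, hw0mem, hw0⟩ := List.mem_map.1 hfmem
    have hle : (nums.count v0 : Int) ≤ f :=
      hfmax _ (List.mem_map_of_mem hv0mem)
    have hge : f ≤ (nums.count v0 : Int) := by
      have hw0K : w0 ∈ d.keys := by rw [hK, PySem.List.mem_dedup]; exact hw0mem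
      have hb := hrbd _ (by rw [hvalsA]; exact List.mem_map_of_mem hw0K)
      have h1 : (xs.foldl pyMinStep3 x).1 = -(nums.count v0 : Int) := by
        rw [← hv0]; rfl
      simp only [h1, aTriple] at hb
      omega
    have hfeq : (nums.count v0 : Int) = f := le_antisymm hle hge
    have hrev : (PySem.List.slice? nums none none (-1)).getD [] = nums.reverse := by
      rw [PySem.List.slice?_none_none_neg_one]; rfl
    have hB : solve_alt nums =
        (PySem.List.min?
           (((PySem.List.dedup nums).filter (fun v => ((nums.count v : Int) == f))).map
              (fun v => (nums.length : Int) - fIdx nums v - fIdx nums.reverse v))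
           (fun y => y)).getD 0 := by
      simp only [solve_alt]
      rw [hmax, hrev]
      rfl
    have hv0F : v0 ∈ (PySem.List.dedup nums).filter (fun v => ((nums.count v : Int) == f)) :=
      List.mem_filter.2 ⟨hK ▸ hv0K, by simp [hfeq]⟩
    have hSmem : ((nums.length : Int) - fIdx nums v0 - fIdx nums.reverse v0) ∈
        ((PySem.List.dedup nums).filter (fun v => ((nums.count v : Int) == f))).map
          (fun v => (nums.length : Int) - fIdx nums v - fIdx nums.reverse v) :=
      List.mem_map_of_mem hv0F
    cases hmin : PySem.List.min?
        (((PySem.List.dedup nums).filter (fun v => ((nums.count v : Int) == f))).map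
          (fun v => (nums.length : Int) - fIdx nums v - fIdx nums.reverse v)) (fun y => y) with
    | none =>
      exact absurd ((PySem.List.min?_eq_none_iff _ _).1 hmin) (List.ne_nil_of_mem hSmem)
    | some m2 =>
      have hm2le : m2 ≤ (nums.length : Int) - fIdx nums v0 - fIdx nums.reverse v0 :=
        PySem.List.min?_isMin hmin _ hSmem
      obtain ⟨w, hwF, hwm2⟩ := List.mem_map.1 (PySem.List.min?_mem hmin)
      obtain ⟨hwD, hwf⟩ := List.mem_filter.1 hwF
      have hwK : w ∈ d.keys := hK ▸ hwD
      have hwcnt : (nums.count w : Int) = f := by simpa using hwf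
      have hb := hrbd _ (by rw [hvalsA]; exact List.mem_map_of_mem hwK)
      have h1 : (xs.foldl pyMinStep3 x).1 = -(nums.count v0 : Int) := by rw [← hv0]; rfl
      have h2 : (xs.foldl pyMinStep3 x).2.1 =
          (nums.length : Int) - fIdx nums v0 - fIdx nums.reverse v0 := by rw [← hv0]; rfl
      rw [hA, hB, hmin]
      simp only [h1, h2, aTriple, hwcnt, hfeq, Option.getD_some] at hb ⊢
      omega
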